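-- pv_equiv track=rewrite | github.com/HERA-Team/hera_sim | hera_sim/cli_utils.py | _validate_freq_params
-- ===== SOURCE A (Python) =====
-- import itertools
--
-- def _validate_freq_params(freq_params):
--     """Ensure frequency parameters specified are sufficient."""
--     allowed_params = (
--         "Nfreqs",
--         "start_freq",
--         "bandwidth",
--         "freq_array",
--         "channel_width",
--     )
--     allowed_combinations = [
--         combo
--         for combo in itertools.combinations(allowed_params, 3)
--         if "start_freq" in combo and "freq_array" not in combo
--     ] + [("freq_array",)]
--     for combination in allowed_combinations:
--         if all(freq_params.get(param, None) is not None for param in combination):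
--             return True
--
--     # None of the minimum necessary combinations are satisfied if we get here
--     return False
-- ===== SOURCE B (Python) =====
-- def _validate_freq_params(freq_params):
--     """Ensure frequency parameters specified are sufficient."""
--     if freq_params.get("freq_array") is not None:
--         return True
--     if freq_params.get("start_freq") is None:
--         return False
--     others = ("Nfreqs", "bandwidth", "channel_width")
--     count = sum(freq_params.get(param) is not None for param in others)
--     return count >= 2
-- ===== Notes on version B (the rewrite author's own statement) =====
-- stated objective: simpler
-- what changed: B replaces the enumerate-all-combinations-of-parameter-names scan (itertools.combinations + per-combination all()) with a direct predicate: freq_array present, or start_freq present together with at least 2 of the other 3 parameters.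
import Mathlib
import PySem

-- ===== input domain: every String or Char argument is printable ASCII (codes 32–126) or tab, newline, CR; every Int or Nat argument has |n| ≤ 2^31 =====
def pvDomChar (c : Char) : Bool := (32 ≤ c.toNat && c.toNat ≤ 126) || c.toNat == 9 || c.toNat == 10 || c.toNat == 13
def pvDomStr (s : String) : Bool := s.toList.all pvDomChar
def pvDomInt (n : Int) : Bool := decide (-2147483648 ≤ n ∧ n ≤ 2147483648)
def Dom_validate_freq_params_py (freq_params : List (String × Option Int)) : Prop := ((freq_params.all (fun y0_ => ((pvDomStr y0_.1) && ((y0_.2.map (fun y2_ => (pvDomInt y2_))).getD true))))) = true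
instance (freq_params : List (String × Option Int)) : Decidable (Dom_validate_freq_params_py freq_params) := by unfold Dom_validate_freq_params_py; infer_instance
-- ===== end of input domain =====

-- B replaces A's enumerate-combinations-and-scan with a direct predicate (freq_array, or
-- start_freq plus at least 2 of the other 3); same return value everywhere (objective: simpler).

-- ===== PORT A =====
-- itertools.combinations(l, n) over a list of names (order-preserving, as in Python)
def pyCombinations : Nat → List String → List (List String)
  | 0, _ => [[]]
  | _ + 1, [] => []
  | n + 1, x :: xs => (pyCombinations n xs).map (fun c => x :: c) ++ pyCombinations (n + 1) xs

def validate_freq_params_py (freq_params : List (String × Option Int)) : Bool :=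
  let allowed_params : List String :=
    ["Nfreqs", "start_freq", "bandwidth", "freq_array", "channel_width"]
  let allowed_combinations : List (List String) :=
    ((pyCombinations 3 allowed_params).filter
      (fun combo => combo.contains "start_freq" && !(combo.contains "freq_array")))
      ++ [["freq_array"]]
  -- the for-loop with early return True, else False
  allowed_combinations.any (fun combination =>
    combination.all (fun param =>
      ((PySem.Dict.mk freq_params).getD param (none : Option Int)).isSome))

-- ===== PORT B =====
def validate_freq_params_py_alt (freq_params : List (String × Option Int)) : Bool :=
  let get := fun (k : String) => (PySem.Dict.mk freq_params).getD k (none : Option Int)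
  if (get "freq_array").isSome then true
  else if !(get "start_freq").isSome then false
  else
    let others : List String := ["Nfreqs", "bandwidth", "channel_width"]
    let count := (others.map (fun p => if (get p).isSome then (1 : Int) else 0)).sum
    decide (2 ≤ count)

-- ===== PRECONDITION & SPEC =====
def Spec_validate_freq_params_py (freq_params : List (String × Option Int)) (out : Bool) : Prop := out = validate_freq_params_py_alt freq_params
instance (freq_params : List (String × Option Int)) (out : Bool) : Decidable (Spec_validate_freq_params_py freq_params out) := by unfold Spec_validate_freq_params_py; infer_instance

-- ===== CLAIM (what is proved, stated in full; the proofs are below) =====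
def Claim_equal_validate_freq_params_py : Prop := ∀ (freq_params : List (String × Option Int)), Dom_validate_freq_params_py freq_params → Spec_validate_freq_params_py freq_params (validate_freq_params_py freq_params)

-- ===== LEMMAS AND PROOFS =====
theorem validate_eq (freq_params : List (String × Option Int)) :
    validate_freq_params_py freq_params = validate_freq_params_py_alt freq_params := by
  unfold validate_freq_params_py validate_freq_params_py_alt
  cases h1 : ((PySem.Dict.mk freq_params).getD "Nfreqs" (none : Option Int)).isSome <;>
  cases h2 : ((PySem.Dict.mk freq_params).getD "start_freq" (none : Option Int)).isSome <;>
  cases h3 : ((PySem.Dict.mk freq_params).getD "bandwidth" (none : Option Int)).isSome <;>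
  cases h4 : ((PySem.Dict.mk freq_params).getD "freq_array" (none : Option Int)).isSome <;>
  cases h5 : ((PySem.Dict.mk freq_params).getD "channel_width" (none : Option Int)).isSome <;>
  simp [pyCombinations, h1, h2, h3, h4, h5]

-- ===== VERDICT (by name: the statement is the Claim_ definition above) =====
theorem validate_freq_params_py_spec : Claim_equal_validate_freq_params_py := by
  intro freq_params _
  exact validate_eq freq_params
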